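-- pv_equiv track=rewrite | github.com/cvbjasyogya-glitch/WMS | routes/attendance_portal.py | _has_open_break
-- ===== SOURCE A (Python) =====
-- def _has_open_break(day_logs):
--     break_open = False
--     for log in day_logs:
--         punch_type = log["punch_type"]
--         if punch_type == "break_start":
--             break_open = True
--         elif punch_type in {"break_finish", "check_out"}:
--             break_open = False
--     return break_open
-- ===== SOURCE B (Python) =====
-- def _has_open_break(day_logs):
--     relevant = [l for l in day_logs
--                 if l["punch_type"] in {"break_start", "break_finish", "check_out"}]
--     return bool(relevant) and relevant[-1]["punch_type"] == "break_start"
-- ===== Notes on version B (the rewrite author's own statement) =====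
-- stated objective: simpler
-- what changed: B filters the relevant punch types and decides from the last relevant punch alone, instead of folding a running break_open flag across the whole sequence.
import Mathlib
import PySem

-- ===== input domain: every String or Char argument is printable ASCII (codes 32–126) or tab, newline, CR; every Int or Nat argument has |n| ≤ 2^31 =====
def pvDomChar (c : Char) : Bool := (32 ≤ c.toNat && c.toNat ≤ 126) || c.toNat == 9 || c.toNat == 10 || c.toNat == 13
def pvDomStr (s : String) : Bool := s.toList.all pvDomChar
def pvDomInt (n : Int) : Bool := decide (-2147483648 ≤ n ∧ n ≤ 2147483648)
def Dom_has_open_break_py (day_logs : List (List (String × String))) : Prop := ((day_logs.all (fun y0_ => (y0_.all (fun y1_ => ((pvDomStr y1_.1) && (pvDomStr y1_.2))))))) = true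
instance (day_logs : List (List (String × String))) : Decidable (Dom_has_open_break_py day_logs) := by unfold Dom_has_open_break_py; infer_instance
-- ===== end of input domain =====

-- B filters the relevant punch types and decides from the last relevant punch, instead of folding a running flag (objective: simpler).


-- ===== PORT A =====
-- log["punch_type"] is first-match lookup; outside Pre_ (missing key) Python raises KeyError, here getD "".
def has_open_break_py (day_logs : List (List (String × String))) : Bool :=
  day_logs.foldl (fun break_open log =>
    let punch_type := (log.lookup "punch_type").getD ""
    if punch_type == "break_start" then true
    else if punch_type == "break_finish" || punch_type == "check_out" then false
    else break_open) false

-- ===== PORT B =====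
def pvRelevant (log : List (String × String)) : Bool :=
  let p := (log.lookup "punch_type").getD ""
  p == "break_start" || p == "break_finish" || p == "check_out"

def has_open_break_py_alt (day_logs : List (List (String × String))) : Bool :=
  let relevant := day_logs.filter pvRelevant
  match relevant.getLast? with
  | none => false
  | some l => (l.lookup "punch_type").getD "" == "break_start"

-- ===== PRECONDITION & SPEC =====
-- Pre_ excludes logs lacking the "punch_type" key, on which Python A raises KeyError.
def Pre_has_open_break_py (day_logs : List (List (String × String))) : Prop :=
  ∀ log ∈ day_logs, (log.lookup "punch_type").isSome = true
instance (day_logs : List (List (String × String))) : Decidable (Pre_has_open_break_py day_logs) := by unfold Pre_has_open_break_py; infer_instance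

def pvWitness_has_open_break_py : (List (List (String × String))) :=
  [[("punch_type", "break_start")], [("punch_type", "check_in")]]

def Spec_has_open_break_py (day_logs : List (List (String × String))) (out : Bool) : Prop := out = has_open_break_py_alt day_logs
instance (day_logs : List (List (String × String))) (out : Bool) : Decidable (Spec_has_open_break_py day_logs out) := by unfold Spec_has_open_break_py; infer_instance

-- ===== CLAIM (what is proved, stated in full; the proofs are below) =====
def Claim_equal_has_open_break_py : Prop := ∀ (day_logs : List (List (String × String))), Dom_has_open_break_py day_logs → Pre_has_open_break_py day_logs → Spec_has_open_break_py day_logs (has_open_break_py day_logs)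

-- ===== LEMMAS AND PROOFS =====
-- The fold's result equals the verdict of the last relevant punch, with the accumulator as default.
theorem pv_fold_last (l : List (List (String × String))) : ∀ (b : Bool),
    l.foldl (fun break_open log =>
      let punch_type := (log.lookup "punch_type").getD ""
      if punch_type == "break_start" then true
      else if punch_type == "break_finish" || punch_type == "check_out" then false
      else break_open) b
    = (match (l.filter pvRelevant).getLast? with
       | none => b
       | some x => (x.lookup "punch_type").getD "" == "break_start") := by
  induction l with
  | nil => intro b; simp
  | cons a t ih =>
    intro b
    simp only [List.foldl_cons, List.filter_cons]
    by_cases hr : pvRelevant a = true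
    · simp only [hr, if_true]
      rw [ih]
      cases ht : (t.filter pvRelevant).getLast? with
      | some x => simp [List.getLast?_cons, ht]
      | none =>
        have : t.filter pvRelevant = [] := by
          cases h : t.filter pvRelevant with
          | nil => rfl
          | cons y ys => rw [h] at ht; simp [List.getLast?] at ht
        simp only [this, List.getLast?_singleton]
        unfold pvRelevant at hr
        by_cases h1 : ((a.lookup "punch_type").getD "" == "break_start") = true
        · simp [h1]
        · simp only [h1, Bool.false_or] at hr
          simp [h1, hr]
    · have hr' : pvRelevant a = false := by simpa using hr
      simp only [hr', Bool.false_eq_true, if_false]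
      unfold pvRelevant at hr'
      simp only [Bool.or_eq_false_iff] at hr'
      obtain ⟨⟨h1, h2⟩, h3⟩ := hr'
      rw [ih]
      simp [h1, h2, h3]

-- ===== VERDICT (by name: the statement is the Claim_ definition above) =====
theorem has_open_break_py_spec : Claim_equal_has_open_break_py := by
  intro day_logs _ _
  unfold Spec_has_open_break_py has_open_break_py has_open_break_py_alt
  rw [pv_fold_last]
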